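-- pv_equiv track=rewrite | github.com/randyyan2000/BonkersBot | osu.py | mod_string
-- ===== SOURCE A (Python) =====
-- MODS_ENUM = {
--     ''    : 0,
--     'NF'  : 1,
--     'EZ'  : 2,
--     'TD'  : 4,
--     'HD'  : 8,
--     'HR'  : 16,
--     'SD'  : 32,
--     'DT'  : 64,
--     'RX'  : 128,
--     'HT'  : 256,
--     'NC'  : 512,
--     'FL'  : 1024,
--     'AT'  : 2048,
--     'SO'  : 4096,
--     'AP'  : 8192,
--     'PF'  : 16384,
--     '4K'  : 32768,
--     '5K'  : 65536,
--     '6K'  : 131072,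
--     '7K'  : 262144,
--     '8K'  : 524288,
--     'FI'  : 1048576,
--     'RD'  : 2097152,
--     'LM'  : 4194304,
--     '9K'  : 16777216,
--     '10K' : 33554432,
--     '1K'  : 67108864,
--     '3K'  : 134217728,
--     '2K'  : 268435456,
--     'V2'  : 536870912,
-- }
--
-- def mod_string(modnum, nm='NM'):
--     # e.g. '+HDDT'
--     modStrs = []
--     for mod in MODS_ENUM:
--         if MODS_ENUM[mod] & modnum != 0:
--             modStrs.append(mod)
--     if len(modStrs):
--         if 'NC' in modStrs and 'DT' in modStrs:
--             modStrs.remove('DT')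
--         if 'PF' in modStrs and 'SD' in modStrs:
--             modStrs.remove('SD')
--         return f'+{"".join(modStrs)}'
--     else:
--         return nm
-- ===== SOURCE B (Python) =====
-- MODS_ENUM = {
--     ''    : 0,
--     'NF'  : 1,
--     'EZ'  : 2,
--     'TD'  : 4,
--     'HD'  : 8,
--     'HR'  : 16,
--     'SD'  : 32,
--     'DT'  : 64,
--     'RX'  : 128,
--     'HT'  : 256,
--     'NC'  : 512,
--     'FL'  : 1024,
--     'AT'  : 2048,
--     'SO'  : 4096,
--     'AP'  : 8192,
--     'PF'  : 16384,
--     '4K'  : 32768,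
--     '5K'  : 65536,
--     '6K'  : 131072,
--     '7K'  : 262144,
--     '8K'  : 524288,
--     'FI'  : 1048576,
--     'RD'  : 2097152,
--     'LM'  : 4194304,
--     '9K'  : 16777216,
--     '10K' : 33554432,
--     '1K'  : 67108864,
--     '3K'  : 134217728,
--     '2K'  : 268435456,
--     'V2'  : 536870912,
-- }
--
-- # inverse index: bit value -> mod name, and the mask of all defined bits
-- INV = {v: k for k, v in MODS_ENUM.items() if v}
-- ALL_MASK = 0
-- for _v in MODS_ENUM.values():
--     ALL_MASK |= _v
--
--
-- def mod_string(modnum, nm='NM'):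
--     # walk the bits of the number itself (masked to the defined flags, which also
--     # makes negative modnum finite) instead of scanning the flag table; the table
--     # values are ascending powers of two, so ascending-bit order is dict order
--     names = []
--     relevant = modnum & ALL_MASK
--     bit = 1
--     while relevant:
--         if relevant & 1:
--             names.append(INV[bit])
--         relevant >>= 1
--         bit <<= 1
--     if not names:
--         return nm
--     if 'NC' in names and 'DT' in names:
--         names.remove('DT')
--     if 'PF' in names and 'SD' in names:
--         names.remove('SD')
--     return f'+{"".join(names)}'
-- ===== Notes on version B (the rewrite author's own statement) =====
-- stated objective: alternative
-- what changed: B inverts the data flow: instead of scanning all 30 MODS_ENUM entries and testing each value against modnum, it masks modnum with the OR of all defined flags once and walks the set bits of that number itself (shift/test loop), mapping each bit to its name through a precomputed value-to-name inverse index; the NC/DT and PF/SD cleanups and the '+'join/nm return are unchanged.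
import Mathlib
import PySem

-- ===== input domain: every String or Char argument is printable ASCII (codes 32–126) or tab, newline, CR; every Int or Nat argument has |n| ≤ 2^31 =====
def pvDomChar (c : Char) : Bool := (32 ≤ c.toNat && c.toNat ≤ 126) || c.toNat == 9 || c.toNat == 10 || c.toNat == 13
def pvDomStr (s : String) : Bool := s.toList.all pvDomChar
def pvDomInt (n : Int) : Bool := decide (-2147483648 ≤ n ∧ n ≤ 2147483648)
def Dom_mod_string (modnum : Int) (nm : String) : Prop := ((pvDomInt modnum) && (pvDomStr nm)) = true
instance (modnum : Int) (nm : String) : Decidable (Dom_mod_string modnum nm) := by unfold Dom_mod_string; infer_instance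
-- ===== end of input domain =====

-- B walks the bits of the (masked) number itself, looking names up in an inverse
-- value→name index, instead of A's scan of the 30-entry flag table; objective: alternative.

-- MODS_ENUM in insertion order (keys distinct, so iterating the dict's keys and
-- looking each key up is exactly iterating these pairs).
def pvMods : List (String × Int) :=
  [("", 0), ("NF", 1), ("EZ", 2), ("TD", 4), ("HD", 8), ("HR", 16), ("SD", 32),
   ("DT", 64), ("RX", 128), ("HT", 256), ("NC", 512), ("FL", 1024), ("AT", 2048),
   ("SO", 4096), ("AP", 8192), ("PF", 16384), ("4K", 32768), ("5K", 65536),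
   ("6K", 131072), ("7K", 262144), ("8K", 524288), ("FI", 1048576), ("RD", 2097152),
   ("LM", 4194304), ("9K", 16777216), ("10K", 33554432), ("1K", 67108864),
   ("3K", 134217728), ("2K", 268435456), ("V2", 536870912)]

-- ===== PORT A =====
def mod_string (modnum : Int) (nm : String) : String :=
  -- for mod in MODS_ENUM: if MODS_ENUM[mod] & modnum != 0: modStrs.append(mod)
  let modStrs : List String :=
    pvMods.foldl (fun acc p => if PySem.Int.band p.2 modnum ≠ 0 then acc ++ [p.1] else acc) []
  if modStrs.length ≠ 0 then
    -- if 'NC' in modStrs and 'DT' in modStrs: modStrs.remove('DT')   (guarded, so remove? is some)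
    let modStrs1 := if "NC" ∈ modStrs ∧ "DT" ∈ modStrs
      then (PySem.List.remove? modStrs "DT").getD modStrs else modStrs
    let modStrs2 := if "PF" ∈ modStrs1 ∧ "SD" ∈ modStrs1
      then (PySem.List.remove? modStrs1 "SD").getD modStrs1 else modStrs1
    "+" ++ PySem.Str.join "" modStrs2
  else nm

-- ===== PORT B =====
-- INV = {v: k for k, v in MODS_ENUM.items() if v}
def pvInv : PySem.Dict Int String :=
  PySem.Dict.ofList (pvMods.filterMap (fun p => if p.2 ≠ 0 then some (p.2, p.1) else none))

-- ALL_MASK = 0; for _v in MODS_ENUM.values(): ALL_MASK |= _v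
def pvAllMask : Int := pvMods.foldl (fun a p => PySem.Int.bor a p.2) 0

-- while relevant: if relevant & 1: names.append(INV[bit]); relevant >>= 1; bit <<= 1
-- 'while relevant:' is 'relevant ≠ 0'; relevant = modnum & ALL_MASK is nonnegative, so the
-- guard is written 0 < relevant (needed for Lean termination; equal to ≠ 0 here).
-- INV[bit] cannot raise KeyError (bit 23 is cleared by the mask), so '.getD ""' never fires.
def pvLoop (relevant : Int) (bit : Int) (acc : List String) : List String :=
  if h : 0 < relevant then
    pvLoop (relevant >>> (1 : Nat)) (bit <<< (1 : Nat))
      (if PySem.Int.band relevant 1 ≠ 0 then acc ++ [(PySem.Dict.get? pvInv bit).getD ""] else acc)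
  else acc
termination_by relevant.toNat
decreasing_by
  have h2 : relevant = ((relevant.toNat : Nat) : Int) := by omega
  rw [h2, ← Int.natCast_shiftRight]
  simp only [Int.toNat_natCast, Nat.shiftRight_one]
  omega

def mod_string_alt (modnum : Int) (nm : String) : String :=
  let names := pvLoop (PySem.Int.band modnum pvAllMask) 1 []
  if names = [] then nm
  else
    let names1 := if "NC" ∈ names ∧ "DT" ∈ names
      then (PySem.List.remove? names "DT").getD names else names
    let names2 := if "PF" ∈ names1 ∧ "SD" ∈ names1
      then (PySem.List.remove? names1 "SD").getD names1 else names1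
    "+" ++ PySem.Str.join "" names2

-- ===== PRECONDITION & SPEC =====
def Spec_mod_string (modnum : Int) (nm : String) (out : String) : Prop := out = mod_string_alt modnum nm
instance (modnum : Int) (nm : String) (out : String) : Decidable (Spec_mod_string modnum nm out) := by unfold Spec_mod_string; infer_instance

-- ===== CLAIM (what is proved, stated in full; the proofs are below) =====
def Claim_equal_mod_string : Prop := ∀ (modnum : Int) (nm : String), Dom_mod_string modnum nm → Spec_mod_string modnum nm (mod_string modnum nm)

-- ===== LEMMAS AND PROOFS =====

-- A's bit test as a Bool predicate on table pairs, and A's raw name list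
def pvCond (modnum : Int) (p : String × Int) : Bool := decide (PySem.Int.band p.2 modnum ≠ 0)
def pvL (modnum : Int) : List String := (pvMods.filter (pvCond modnum)).map Prod.fst

theorem pvL_eq (modnum : Int) :
    pvMods.foldl (fun acc p => if PySem.Int.band p.2 modnum ≠ 0 then acc ++ [p.1] else acc) [] =
      pvL modnum := by
  have := PySem.List.foldl_append_if (pvCond modnum) Prod.fst pvMods []
  simpa [pvCond] using this

-- proof-side mirror of pvLoop's body, recursing on the Nat value
def pvBits (n : Nat) (bit : Int) : List String :=
  if n = 0 then []
  else (if n % 2 = 1 then [(PySem.Dict.get? pvInv bit).getD ""] else []) ++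
    pvBits (n / 2) (bit <<< (1 : Nat))

theorem pvLoop_eq (n : Nat) : ∀ (bit : Int) (acc : List String),
    pvLoop ((n : Nat) : Int) bit acc = acc ++ pvBits n bit := by
  induction n using Nat.strong_induction_on with
  | _ n ih =>
    intro bit acc
    rw [pvLoop, pvBits]
    by_cases h : n = 0
    · simp [h]
    · have hpos : (0 : Int) < (n : Int) := by omega
      rw [dif_pos hpos, if_neg h]
      have hshift : ((n : Nat) : Int) >>> (1 : Nat) = ((n / 2 : Nat) : Int) := by
        rw [← Int.natCast_shiftRight, Nat.shiftRight_one]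
      have hband : PySem.Int.band ((n : Nat) : Int) 1 = ((n % 2 : Nat) : Int) := by
        have h1 : (1 : Int) = ((1 : Nat) : Int) := rfl
        rw [h1, PySem.Int.band_natCast, Nat.and_one_is_mod]
      rw [hshift, ih (n / 2) (by omega)]
      by_cases hp : n % 2 = 1
      · rw [if_pos (by rw [hband]; omega), if_pos hp, List.append_assoc]
      · rw [if_neg (by rw [hband]; omega), if_neg hp, List.nil_append]

-- bit 0 of &&& and ^^^
theorem pv_and_mod_two (x c : Nat) : (x &&& c) % 2 = x % 2 * (c % 2) := by
  rw [← Nat.and_one_is_mod (x &&& c), Nat.land_assoc, Nat.and_one_is_mod c]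
  rcases Nat.mod_two_eq_zero_or_one c with hc | hc
  · rw [hc]; simp
  · rw [hc, Nat.and_one_is_mod]; ring

theorem pv_xor_mod_two (x u : Nat) : (x ^^^ u) % 2 = (x % 2 + u % 2) % 2 := by
  rw [← Nat.and_one_is_mod (x ^^^ u), Nat.and_xor_distrib_right,
    Nat.and_one_is_mod x, Nat.and_one_is_mod u]
  rcases Nat.mod_two_eq_zero_or_one x with hx | hx <;>
    rcases Nat.mod_two_eq_zero_or_one u with hu | hu <;> rw [hx, hu] <;> decide

-- a submask subtracts as an xor: x - (x &&& c) = x ^^^ (x &&& c)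
theorem pv_sub_and_eq_xor (x : Nat) : ∀ c : Nat, x - (x &&& c) = x ^^^ (x &&& c) := by
  induction x using Nat.strong_induction_on with
  | _ x ih =>
    intro c
    by_cases h0 : x = 0
    · simp [h0]
    · have hdiv : (x &&& c) / 2 = x / 2 &&& c / 2 := Nat.and_div_two
      have hmod : (x &&& c) % 2 = x % 2 * (c % 2) := pv_and_mod_two x c
      have hxmod : (x ^^^ (x &&& c)) % 2 = (x % 2 + (x &&& c) % 2) % 2 := pv_xor_mod_two _ _
      have hxdiv : (x ^^^ (x &&& c)) / 2 = x / 2 ^^^ (x / 2 &&& c / 2) := by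
        rw [Nat.xor_div_two, hdiv]
      have hih := ih (x / 2) (by omega) (c / 2)
      have hle : x / 2 &&& c / 2 ≤ x / 2 := Nat.and_le_left
      have e1 := Nat.div_add_mod (x &&& c) 2
      have e2 := Nat.div_add_mod (x ^^^ (x &&& c)) 2
      have e3 := Nat.div_add_mod x 2
      rcases Nat.mod_two_eq_zero_or_one x with hx | hx <;>
        rcases Nat.mod_two_eq_zero_or_one c with hc | hc <;>
          rw [hx, hc] at hmod <;> rw [hx] at hxmod <;> norm_num at hmod <;> omega

-- bit e of a ↑c-masked value, read off through A's per-flag test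
theorem pv_band_mask_testBit (c : Nat) (m : Int) (e : Nat) :
    ((PySem.Int.band (c : Int) m).toNat).testBit e =
      (c.testBit e && decide (PySem.Int.band ((2 : Int) ^ e) m ≠ 0)) := by
  have hp : ((2 : Int) ^ e) = (((2 ^ e : Nat) : Int)) := by push_cast; ring
  have hne : (2 : Nat) ^ e ≠ 0 := by positivity
  by_cases hm : 0 ≤ m
  · rw [PySem.Int.band_of_nonneg (by positivity) hm, hp,
      PySem.Int.band_of_nonneg (by positivity) hm]
    simp only [Int.toNat_natCast, Nat.testBit_land]
    congr 1
    cases hb : (m.toNat).testBit e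
    · have hv : 2 ^ e &&& m.toNat = 0 := by
        rw [Nat.two_pow_and, hb]; simp
      simp [hv]
    · have hv : 2 ^ e &&& m.toNat = 2 ^ e := by
        rw [Nat.two_pow_and, hb]; simp
      simp [hv, hne]
  · -- m < 0: band ↑a m = ↑(a - (a &&& (-m-1).toNat))
    have hband : ∀ a : Nat, PySem.Int.band ((a : Nat) : Int) m =
        ((a - (a &&& (-m - 1).toNat) : Nat) : Int) := by
      intro a
      simp only [PySem.Int.band]
      rw [if_pos (by positivity), if_neg hm]
      simp
    rw [hband c, hp, hband (2 ^ e)]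
    simp only [Int.toNat_natCast]
    set d := (-m - 1).toNat with hd
    rw [pv_sub_and_eq_xor c d]
    have h1 : (c ^^^ (c &&& d)).testBit e = (c.testBit e && !d.testBit e) := by
      rw [Nat.testBit_xor, Nat.testBit_land]
      cases c.testBit e <;> cases d.testBit e <;> rfl
    rw [h1]
    congr 1
    have h2 : 2 ^ e &&& d = (d.testBit e).toNat * 2 ^ e := by
      rw [Nat.land_comm, Nat.and_two_pow]
    cases hb : d.testBit e
    · have hv : 2 ^ e &&& d = 0 := by rw [h2, hb]; simp
      simp [hv, hne]
    · have hv : 2 ^ e &&& d = 2 ^ e := by rw [h2, hb]; simp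
      simp [hv]

-- the canonical name list of a bit predicate over the 30 possible flag bits
def pvNames (f : Nat → Bool) : List String :=
  ((List.range 30).filter f).map (fun i => (PySem.Dict.get? pvInv ((2 : Int) ^ i)).getD "")

theorem pvBits_eq (B : Nat) : ∀ (n : Nat) (k : Nat), n < 2 ^ B →
    pvBits n ((2 : Int) ^ k) =
      ((List.range B).filter n.testBit).map
        (fun i => (PySem.Dict.get? pvInv ((2 : Int) ^ (k + i))).getD "") := by
  induction B with
  | zero => intro n k hn; interval_cases n; simp [pvBits]
  | succ B ihB =>
    intro n k hn
    by_cases h0 : n = 0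
    · simp [pvBits, h0]
    · have hsh : ((2 : Int) ^ k) <<< (1 : Nat) = (2 : Int) ^ (k + 1) := by
        rw [Int.shiftLeft_eq]; ring
      rw [pvBits, if_neg h0, hsh, ihB (n / 2) (k + 1) (by rw [pow_succ] at hn; omega)]
      rw [List.range_succ_eq_map, List.filter_cons]
      have hcomp : (n.testBit ∘ Nat.succ) = (n / 2).testBit :=
        funext (fun i => Nat.testBit_succ n i)
      rw [List.filter_map, hcomp]
      have hfun : ((fun i => (PySem.Dict.get? pvInv ((2 : Int) ^ (k + i))).getD "") ∘ Nat.succ) =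
          (fun i => (PySem.Dict.get? pvInv ((2 : Int) ^ (k + 1 + i))).getD "") := by
        funext i
        simp only [Function.comp]
        have hki : k + Nat.succ i = k + 1 + i := by omega
        rw [hki]
      by_cases hp : n % 2 = 1
      · have ht : n.testBit 0 = true := by simp [Nat.testBit_zero, hp]
        rw [ht, if_pos rfl, if_pos hp, List.map_cons, List.map_map, hfun]
        norm_num
      · have ht : n.testBit 0 = false := by
          simp only [Nat.testBit_zero, decide_eq_false_iff_not]
          omega
        rw [if_neg hp, ht, if_neg (by simp : ¬(false = true)), List.map_map, hfun,
          List.nil_append]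

theorem pvNames_congr (f g : Nat → Bool) (h : ∀ i, i < 30 → f i = g i) :
    pvNames f = pvNames g := by
  unfold pvNames
  congr 1
  apply List.filter_congr
  intro i hi
  simp only [List.mem_range] at hi
  exact h i hi

-- pvAllMask is the Nat constant 1065353215 (all bits 0..29 except bit 23)
theorem pvAllMask_val : pvAllMask = ((1065353215 : Nat) : Int) := by decide

theorem pv_band_mask_nonneg (m : Int) : 0 ≤ PySem.Int.band m pvAllMask := by
  rw [PySem.Int.band_comm]
  exact PySem.Int.band_nonneg_of_nonneg_left m (by rw [pvAllMask_val]; positivity)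

theorem pv_band_le (c : Nat) (m : Int) : (PySem.Int.band (c : Int) m).toNat ≤ c := by
  simp only [PySem.Int.band]
  rw [if_pos (by positivity)]
  by_cases hm : 0 ≤ m
  · rw [if_pos hm]
    simp only [Int.toNat_natCast]
    exact Nat.and_le_left
  · rw [if_neg hm]
    simp only [Int.toNat_natCast]
    omega

theorem pv_band_mask_lt (m : Int) : (PySem.Int.band m pvAllMask).toNat < 2 ^ 30 := by
  rw [PySem.Int.band_comm, pvAllMask_val]
  have h := pv_band_le 1065353215 m
  exact Nat.lt_of_le_of_lt h (by norm_num)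

-- the masked value's bits, as booleans of A's per-flag tests
theorem pv_masked_testBit (modnum : Int) (i : Nat) (hi : i < 30) :
    ((PySem.Int.band modnum pvAllMask).toNat).testBit i =
      (decide (i ≠ 23) && decide (PySem.Int.band ((2 : Int) ^ i) modnum ≠ 0)) := by
  rw [PySem.Int.band_comm, pvAllMask_val, pv_band_mask_testBit]
  congr 1
  interval_cases i <;> decide

-- B's loop output is pvNames of the masked bits
theorem pv_loop_names (modnum : Int) :
    pvLoop (PySem.Int.band modnum pvAllMask) 1 [] =
      pvNames (fun i => decide (i ≠ 23) && decide (PySem.Int.band ((2 : Int) ^ i) modnum ≠ 0)) := by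
  have h0 : PySem.Int.band modnum pvAllMask =
      (((PySem.Int.band modnum pvAllMask).toNat : Nat) : Int) := by
    have := pv_band_mask_nonneg modnum
    omega
  rw [h0, pvLoop_eq, List.nil_append]
  have h1 : (1 : Int) = (2 : Int) ^ 0 := rfl
  rw [h1, pvBits_eq 30 _ 0 (pv_band_mask_lt modnum)]
  rw [pvNames_congr _ _ (fun i hi => (pv_masked_testBit modnum i hi).symm)]
  unfold pvNames
  congr 1
  funext i
  norm_num

-- walking two aligned filter+map chains element by element
theorem pv_chain_cons (F : Nat → Bool) (G : Nat → String) (C : String × Int → Bool)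
    (i : Nat) (p : String × Int) (is : List Nat) (ls : List (String × Int))
    (h1 : G i = p.1) (h2 : F i = C p)
    (rest : (is.filter F).map G = (ls.filter C).map Prod.fst) :
    (((i :: is)).filter F).map G = ((p :: ls).filter C).map Prod.fst := by
  rw [List.filter_cons, List.filter_cons, h2]
  cases hC : C p <;> simp [hC, rest, h1]

theorem pv_chain_skipl (F : Nat → Bool) (G : Nat → String) (i : Nat) (is : List Nat)
    (R : List String) (h : F i = false)
    (rest : (is.filter F).map G = R) : ((i :: is).filter F).map G = R := by
  rw [List.filter_cons, h]
  simpa using rest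

-- and A's list is the same pvNames
theorem pv_A_names (modnum : Int) :
    pvNames (fun i => decide (i ≠ 23) && decide (PySem.Int.band ((2 : Int) ^ i) modnum ≠ 0)) =
      pvL modnum := by
  have hz : pvCond modnum ("", 0) = false := by
    simp only [pvCond]
    rw [PySem.Int.band_comm]
    simp
  simp only [pvNames, pvL, pvMods]
  rw [show List.range 30 = [0,1,2,3,4,5,6,7,8,9,10,11,12,13,14,15,16,17,18,19,20,21,22,23,24,25,26,27,28,29] from by decide]
  rw [List.filter_cons (p := pvCond modnum), hz]
  simp only [Bool.false_eq_true, if_false]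
  apply pv_chain_cons _ _ _ _ _ _ _ (by decide) (by norm_num [pvCond])
  apply pv_chain_cons _ _ _ _ _ _ _ (by decide) (by norm_num [pvCond])
  apply pv_chain_cons _ _ _ _ _ _ _ (by decide) (by norm_num [pvCond])
  apply pv_chain_cons _ _ _ _ _ _ _ (by decide) (by norm_num [pvCond])
  apply pv_chain_cons _ _ _ _ _ _ _ (by decide) (by norm_num [pvCond])
  apply pv_chain_cons _ _ _ _ _ _ _ (by decide) (by norm_num [pvCond])
  apply pv_chain_cons _ _ _ _ _ _ _ (by decide) (by norm_num [pvCond])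
  apply pv_chain_cons _ _ _ _ _ _ _ (by decide) (by norm_num [pvCond])
  apply pv_chain_cons _ _ _ _ _ _ _ (by decide) (by norm_num [pvCond])
  apply pv_chain_cons _ _ _ _ _ _ _ (by decide) (by norm_num [pvCond])
  apply pv_chain_cons _ _ _ _ _ _ _ (by decide) (by norm_num [pvCond])
  apply pv_chain_cons _ _ _ _ _ _ _ (by decide) (by norm_num [pvCond])
  apply pv_chain_cons _ _ _ _ _ _ _ (by decide) (by norm_num [pvCond])
  apply pv_chain_cons _ _ _ _ _ _ _ (by decide) (by norm_num [pvCond])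
  apply pv_chain_cons _ _ _ _ _ _ _ (by decide) (by norm_num [pvCond])
  apply pv_chain_cons _ _ _ _ _ _ _ (by decide) (by norm_num [pvCond])
  apply pv_chain_cons _ _ _ _ _ _ _ (by decide) (by norm_num [pvCond])
  apply pv_chain_cons _ _ _ _ _ _ _ (by decide) (by norm_num [pvCond])
  apply pv_chain_cons _ _ _ _ _ _ _ (by decide) (by norm_num [pvCond])
  apply pv_chain_cons _ _ _ _ _ _ _ (by decide) (by norm_num [pvCond])
  apply pv_chain_cons _ _ _ _ _ _ _ (by decide) (by norm_num [pvCond])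
  apply pv_chain_cons _ _ _ _ _ _ _ (by decide) (by norm_num [pvCond])
  apply pv_chain_cons _ _ _ _ _ _ _ (by decide) (by norm_num [pvCond])
  apply pv_chain_skipl _ _ _ _ _ (by simp)
  apply pv_chain_cons _ _ _ _ _ _ _ (by decide) (by norm_num [pvCond])
  apply pv_chain_cons _ _ _ _ _ _ _ (by decide) (by norm_num [pvCond])
  apply pv_chain_cons _ _ _ _ _ _ _ (by decide) (by norm_num [pvCond])
  apply pv_chain_cons _ _ _ _ _ _ _ (by decide) (by norm_num [pvCond])
  apply pv_chain_cons _ _ _ _ _ _ _ (by decide) (by norm_num [pvCond])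
  apply pv_chain_cons _ _ _ _ _ _ _ (by decide) (by norm_num [pvCond])
  rfl

theorem pv_key (modnum : Int) :
    pvLoop (PySem.Int.band modnum pvAllMask) 1 [] = pvL modnum := by
  rw [pv_loop_names, pv_A_names]

-- ===== VERDICT (by name: the statement is the Claim_ definition above) =====
theorem mod_string_spec : Claim_equal_mod_string := by
  intro modnum nm _
  show mod_string modnum nm = mod_string_alt modnum nm
  simp only [mod_string, mod_string_alt, pvL_eq, pv_key]
  by_cases hL : pvL modnum = []
  · simp [hL]
  · rw [if_pos (by simpa using fun h => hL (List.eq_nil_of_length_eq_zero h)), if_neg hL]
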